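-- pv_equiv track=rewrite | github.com/brandonngiam/Playground | strategy_tester/lib.py | reorder_index
-- ===== SOURCE A (Python) =====
-- def reorder_index (old, new, append_not_found_to_back=False):
--     found = []
--     not_found = []
--     # Missing index start from old's last index + 1,
--     # which is effectively length of old
--     missing_index = len(old)
--     for n in new:
--         try:
--             old_index = old.index(n)
--             found.append(old_index)
--         except ValueError:
--             not_found.append(missing_index)
--             missing_index += 1
--
--     if append_not_found_to_back:
--         found.extend(not_found)
--     return found
-- ===== SOURCE B (Python) =====
-- def reorder_index(old, new, append_not_found_to_back=False):
--     # Inverted "scatter" pass: instead of searching old once per element of new,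
--     # record where each value sits in new, then walk old once, stamping each
--     # value's first old-position into all its slots in new.
--     slots = {}
--     for j, n in enumerate(new):
--         slots.setdefault(n, []).append(j)
--     out = {}
--     for i, v in enumerate(old):
--         js = slots.pop(v, None)
--         if js is not None:
--             for j in js:
--                 out[j] = i
--     result = [out[j] for j in range(len(new)) if j in out]
--     if append_not_found_to_back:
--         result += range(len(old), len(old) + len(new) - len(result))
--     return result
-- ===== Notes on version B (the rewrite author's own statement) =====
-- stated objective: faster
-- what changed: A searches old once per element of new (old.index inside a try/except loop with a running missing counter); B inverts the traversal: it indexes the slot positions of each value in new, then walks old once, stamping each value's first old-position into all of that value's slots, and finally reads the slots back in order, appending an arithmetic range for the unfilled ones.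
import Mathlib
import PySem

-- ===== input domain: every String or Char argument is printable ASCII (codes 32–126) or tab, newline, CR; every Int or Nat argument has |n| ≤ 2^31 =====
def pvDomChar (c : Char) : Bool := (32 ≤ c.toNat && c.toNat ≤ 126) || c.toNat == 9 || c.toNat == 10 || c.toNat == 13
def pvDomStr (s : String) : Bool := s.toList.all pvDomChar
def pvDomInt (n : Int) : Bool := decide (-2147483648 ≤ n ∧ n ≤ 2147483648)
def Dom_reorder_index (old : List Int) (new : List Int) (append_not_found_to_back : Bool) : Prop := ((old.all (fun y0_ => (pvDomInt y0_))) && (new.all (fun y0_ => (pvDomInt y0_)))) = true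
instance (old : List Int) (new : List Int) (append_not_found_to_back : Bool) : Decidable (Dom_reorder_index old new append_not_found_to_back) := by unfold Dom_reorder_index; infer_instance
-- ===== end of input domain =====

-- B inverts A's traversal: instead of searching old once per element of new, it indexes each
-- value's slot positions in new, stamps first old-positions into those slots in one pass over
-- old, and reads the slots back; objective: faster (one pass over each list).

-- ===== PORT A =====
-- single loop over new carrying (found, not_found, missing_index)
def reorder_index (old : List Int) (new : List Int) (append_not_found_to_back : Bool) : List Int :=
  let st := new.foldl (fun (st : List Int × List Int × Int) n =>
      match PySem.List.index? old n with
      | some i => (st.1 ++ [(i : Int)], st.2.1, st.2.2)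
      | none   => (st.1, st.2.1 ++ [st.2.2], st.2.2 + 1))
    ([], [], (old.length : Int))
  if append_not_found_to_back then st.1 ++ st.2.1 else st.1

-- ===== PORT B =====
-- B-side helpers: the slot index of new (value ↦ its positions in new) and the scatter step
-- that pops a value's slots and stamps the current old-position into each of them
def slotsOf (new : List Int) : PySem.Dict Int (List Int) :=
  (PySem.List.enumerate new 0).foldl
    (fun (d : PySem.Dict Int (List Int)) p => d.modify p.2 [] (· ++ [p.1]))
    PySem.Dict.empty

def scatterStep (st : PySem.Dict Int (List Int) × PySem.Dict Int Int) (p : Int × Int) :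
    PySem.Dict Int (List Int) × PySem.Dict Int Int :=
  match st.1.pop? p.2 with
  | some (js, rest) => (rest, js.foldl (fun o j => o.insert j p.1) st.2)
  | none => st

def reorder_index_alt (old : List Int) (new : List Int) (append_not_found_to_back : Bool) : List Int :=
  let st := (PySem.List.enumerate old 0).foldl scatterStep (slotsOf new, PySem.Dict.empty)
  let result := (PySem.List.pyRange 0 (new.length : Int) 1).filterMap (fun j => st.2.get? j)
  if append_not_found_to_back then
    result ++ PySem.List.pyRange (old.length : Int)
      ((old.length : Int) + ((new.length : Int) - (result.length : Int))) 1
  else result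

-- ===== PRECONDITION & SPEC =====
def Spec_reorder_index (old : List Int) (new : List Int) (append_not_found_to_back : Bool) (out : List Int) : Prop := out = reorder_index_alt old new append_not_found_to_back
instance (old : List Int) (new : List Int) (append_not_found_to_back : Bool) (out : List Int) : Decidable (Spec_reorder_index old new append_not_found_to_back out) := by unfold Spec_reorder_index; infer_instance

-- ===== CLAIM (what is proved, stated in full; the proofs are below) =====
def Claim_equal_reorder_index : Prop := ∀ (old : List Int) (new : List Int) (append_not_found_to_back : Bool), Dom_reorder_index old new append_not_found_to_back → Spec_reorder_index old new append_not_found_to_back (reorder_index old new append_not_found_to_back)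

-- ===== LEMMAS AND PROOFS =====

-- old.index as an Option Int (the value A appends and B stamps into slots)
def gIdx (old : List Int) (n : Int) : Option Int :=
  match PySem.List.index? old n with
  | some k => some (k : Int)
  | none => none

theorem gIdx_nil (v : Int) : gIdx [] v = none := rfl

theorem gIdx_cons_self (x : Int) (xs : List Int) : gIdx (x :: xs) x = some 0 := by
  unfold gIdx
  rw [PySem.List.index?_cons_self]
  simp

theorem gIdx_cons_ne (x v : Int) (xs : List Int) (h : x ≠ v) :
    gIdx (x :: xs) v = (gIdx xs v).map (· + 1) := by
  unfold gIdx
  rw [PySem.List.index?_cons_of_ne xs h]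
  cases PySem.List.index? xs v
  · rfl
  · simp

-- get? after erase
theorem dict_get?_erase {ν : Type} (d : PySem.Dict Int ν) (k k' : Int) :
    (d.erase k).get? k' = if k' = k then none else d.get? k' := by
  obtain ⟨items⟩ := d
  simp only [PySem.Dict.erase, PySem.Dict.get?]
  induction items with
  | nil => simp [List.find?_nil]
  | cons p t ih =>
      by_cases h1 : p.1 = k
      · subst h1
        simp only [List.filter_cons, beq_self_eq_true, Bool.not_true, Bool.false_eq_true,
          if_false, ih]
        by_cases h2 : k' = p.1
        · simp [h2]
        · have hf : (p.1 == k') = false := beq_eq_false_iff_ne.mpr (fun hh => h2 hh.symm)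
          rw [List.find?_cons_of_neg (by simp [hf]), if_neg h2]
      · have hpk : (p.1 == k) = false := beq_eq_false_iff_ne.mpr h1
        simp only [List.filter_cons, hpk, Bool.not_false, if_true, List.find?_cons]
        by_cases h2 : p.1 = k'
        · have hne : ¬ k' = k := by rw [← h2]; exact fun hh => h1 hh
          simp [h2, if_neg hne]
        · have hf : (p.1 == k') = false := beq_eq_false_iff_ne.mpr h2
          simp only [hf, ih]

theorem slots_getD (new : List Int) (v : Int) :
    (slotsOf new).getD v [] =
      ((PySem.List.enumerate new 0).filter (fun p => p.2 == v)).map (·.1) := by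
  unfold slotsOf
  have h := PySem.Dict.getD_foldl_modify_append
    ((PySem.List.enumerate new 0).map Prod.swap)
    (PySem.Dict.empty : PySem.Dict Int (List Int)) v
  rw [List.foldl_map] at h
  simp only [Prod.fst_swap, Prod.snd_swap, PySem.Dict.getD_empty, List.nil_append] at h
  rw [h, List.filter_map, List.map_map]
  rfl

theorem mem_slots_iff (new : List Int) (v j : Int) :
    j ∈ (slotsOf new).getD v [] ↔
      ∃ (k : Nat) (h : k < new.length), j = (k : Int) ∧ new[k] = v := by
  rw [slots_getD]
  simp only [List.mem_map, List.mem_filter, PySem.List.mem_enumerate_iff]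
  constructor
  · rintro ⟨p, ⟨⟨k, hk, rfl⟩, hv⟩, hj⟩
    exact ⟨k, hk, by simpa using hj.symm, by simpa using hv⟩
  · rintro ⟨k, hk, rfl, rfl⟩
    exact ⟨(0 + (k : Int), new[k]), ⟨⟨k, hk, rfl⟩, by simp⟩, by simp⟩

theorem get?_writeAll (js : List Int) (i : Int) (o : PySem.Dict Int Int) (j : Int) :
    (js.foldl (fun o j => o.insert j i) o).get? j = if j ∈ js then some i else o.get? j := by
  induction js generalizing o with
  | nil => simp
  | cons a t ih =>
      rw [List.foldl_cons, ih]
      by_cases hj : j ∈ t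
      · simp [hj]
      · by_cases ha : j = a
        · simp [ha, PySem.Dict.get?_insert_self]
        · simp [hj, ha, PySem.Dict.get?_insert_of_ne _ _ ha]

theorem scatter_get (old : List Int) (s : Int) (slots : PySem.Dict Int (List Int))
    (out : PySem.Dict Int Int)
    (hdisj : ∀ v w j, j ∈ slots.getD v [] → j ∈ slots.getD w [] → v = w) (j : Int) :
    (∀ v, j ∈ slots.getD v [] →
      ((PySem.List.enumerate old s).foldl scatterStep (slots, out)).2.get? j
        = match gIdx old v with | some k => some (s + k) | none => out.get? j)
    ∧ ((∀ v, j ∉ slots.getD v []) →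
      ((PySem.List.enumerate old s).foldl scatterStep (slots, out)).2.get? j = out.get? j) := by
  induction old generalizing s slots out with
  | nil =>
      rw [PySem.List.enumerate_nil, List.foldl_nil]
      exact ⟨fun v _ => by rw [gIdx_nil], fun _ => rfl⟩
  | cons x xs ih =>
      rw [PySem.List.enumerate_cons, List.foldl_cons]
      cases hx : slots.get? x with
      | none =>
          have hstep : scatterStep (slots, out) (s, x) = (slots, out) := by
            simp [scatterStep, PySem.Dict.pop?, hx]
          rw [hstep]
          constructor
          · intro v hv
            have hvx : v ≠ x := by
              intro h; subst h
              rw [PySem.Dict.getD_of_get?_eq_none slots [] hx] at hv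
              exact absurd hv (List.not_mem_nil)
            rw [gIdx_cons_ne x v xs (Ne.symm hvx)]
            have h1 := (ih (s + 1) slots out hdisj).1 v hv
            cases hg : gIdx xs v with
            | some k =>
                rw [hg] at h1
                rw [h1]
                simp only [Option.map_some]
                congr 1
                ring
            | none =>
                rw [hg] at h1
                rw [h1]
                simp
          · exact fun hnone => (ih (s + 1) slots out hdisj).2 hnone
      | some js =>
          have hgd : slots.getD x [] = js := PySem.Dict.getD_of_get?_eq_some slots [] hx
          have hstep : scatterStep (slots, out) (s, x)
              = (slots.erase x, js.foldl (fun o j => o.insert j s) out) := by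
            simp [scatterStep, PySem.Dict.pop?, hx]
          rw [hstep]
          have hgd' : ∀ v, (slots.erase x).getD v []
              = if v = x then [] else slots.getD v [] := by
            intro v
            rw [PySem.Dict.getD_eq_get?_getD, dict_get?_erase]
            by_cases hvx : v = x
            · simp [hvx]
            · simp [hvx, PySem.Dict.getD_eq_get?_getD]
          have hdisj' : ∀ v w j, j ∈ (slots.erase x).getD v [] →
              j ∈ (slots.erase x).getD w [] → v = w := by
            intro v w j hv hw
            rw [hgd'] at hv hw
            split_ifs at hv hw
            · exact absurd hv (List.not_mem_nil)
            · exact absurd hv (List.not_mem_nil)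
            · exact absurd hw (List.not_mem_nil)
            · exact hdisj v w j hv hw
          constructor
          · intro v hv
            by_cases hvx : v = x
            · subst hvx
              rw [gIdx_cons_self]
              have hj_in : j ∈ js := hgd ▸ hv
              have hnone : ∀ w, j ∉ (slots.erase v).getD w [] := by
                intro w hw
                rw [hgd'] at hw
                split_ifs at hw with h
                · exact absurd hw (List.not_mem_nil)
                · exact h (hdisj w v j hw hv)
              have h2 := (ih (s + 1) (slots.erase v)
                (js.foldl (fun o j => o.insert j s) out) hdisj').2 hnone
              rw [h2, get?_writeAll, if_pos hj_in]
              norm_num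
            · have hj_nin : j ∉ js := fun h => hvx (hdisj v x j hv (hgd ▸ h))
              have hv' : j ∈ (slots.erase x).getD v [] := by
                rw [hgd', if_neg hvx]; exact hv
              have h1 := (ih (s + 1) (slots.erase x)
                (js.foldl (fun o j => o.insert j s) out) hdisj').1 v hv'
              rw [gIdx_cons_ne x v xs (Ne.symm hvx)]
              cases hg : gIdx xs v with
              | some k =>
                  rw [hg] at h1
                  rw [h1]
                  simp only [Option.map_some]
                  congr 1
                  ring
              | none =>
                  rw [hg] at h1
                  rw [h1, get?_writeAll, if_neg hj_nin]
                  simp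
          · intro hnone
            have hj_nin : j ∉ js := fun h => (hnone x) (hgd ▸ h)
            have hnone' : ∀ v, j ∉ (slots.erase x).getD v [] := by
              intro v hv
              rw [hgd'] at hv
              split_ifs at hv
              · exact absurd hv (List.not_mem_nil)
              · exact hnone v hv
            have h2 := (ih (s + 1) (slots.erase x)
              (js.foldl (fun o j => o.insert j s) out) hdisj').2 hnone'
            rw [h2, get?_writeAll, if_neg hj_nin]

theorem slots_disj (new : List Int) :
    ∀ v w j, j ∈ (slotsOf new).getD v [] → j ∈ (slotsOf new).getD w [] → v = w := by
  intro v w j hv hw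
  rw [mem_slots_iff] at hv hw
  obtain ⟨k1, h1, rfl, rfl⟩ := hv
  obtain ⟨k2, h2, hj2, rfl⟩ := hw
  have : k1 = k2 := by exact_mod_cast hj2
  subst this
  rfl

theorem out_get (old new : List Int) (k : Nat) :
    ((PySem.List.enumerate old 0).foldl scatterStep (slotsOf new, PySem.Dict.empty)).2.get? (k : Int)
      = new[k]?.bind (fun n => gIdx old n) := by
  by_cases hk : k < new.length
  · have hmem : (k : Int) ∈ (slotsOf new).getD new[k] [] :=
      (mem_slots_iff new new[k] (k : Int)).2 ⟨k, hk, rfl, rfl⟩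
    have h1 := (scatter_get old 0 (slotsOf new) PySem.Dict.empty (slots_disj new) (k : Int)).1
      new[k] hmem
    rw [h1, List.getElem?_eq_getElem hk]
    cases hg : gIdx old new[k] with
    | some i => simp [hg]
    | none => simp [hg, PySem.Dict.get?_empty]
  · have hnone : ∀ v, (k : Int) ∉ (slotsOf new).getD v [] := by
      intro v hv
      rw [mem_slots_iff] at hv
      obtain ⟨k', hk', hj, _⟩ := hv
      exact hk (by rwa [(by exact_mod_cast hj : k = k')])
    have h2 := (scatter_get old 0 (slotsOf new) PySem.Dict.empty (slots_disj new) (k : Int)).2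
      hnone
    rw [h2, List.getElem?_eq_none (Nat.le_of_not_lt hk)]
    simp [PySem.Dict.get?_empty]

theorem filterMap_range_getElem {α β : Type} (f : α → Option β) (xs : List α) :
    (List.range xs.length).filterMap (fun k => xs[k]?.bind f) = xs.filterMap f := by
  induction xs with
  | nil => simp
  | cons x t ih =>
      rw [List.length_cons, List.range_succ_eq_map, List.filterMap_cons]
      have hmap : List.filterMap (fun k => (x :: t)[k]?.bind f)
            (List.map Nat.succ (List.range t.length))
          = t.filterMap f := by
        rw [List.filterMap_map, ← ih]
        apply List.filterMap_congr
        intro k _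
        simp [Function.comp]
      simp only [List.getElem?_cons_zero, Option.bind_some, hmap]
      cases h : f x <;> simp [h]

theorem loopA_spec (old : List Int) (new : List Int) (f nf : List Int) (mi : Int) :
    new.foldl (fun (st : List Int × List Int × Int) n =>
      match PySem.List.index? old n with
      | some i => (st.1 ++ [(i : Int)], st.2.1, st.2.2)
      | none   => (st.1, st.2.1 ++ [st.2.2], st.2.2 + 1)) (f, nf, mi)
    = (f ++ new.filterMap (fun n => gIdx old n),
       nf ++ PySem.List.pyRange mi (mi + (new.countP (fun n => (gIdx old n).isNone))) 1,
       mi + (new.countP (fun n => (gIdx old n).isNone))) := by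
  induction new generalizing f nf mi with
  | nil =>
      rw [List.foldl_nil, List.filterMap_nil, List.countP_nil]
      simp [PySem.List.pyRange_one_eq_nil (le_refl mi)]
  | cons n ns ih =>
      rw [List.foldl_cons]
      cases h : PySem.List.index? old n with
      | some i =>
          have hg : gIdx old n = some (i : Int) := by unfold gIdx; rw [h]
          rw [ih, List.filterMap_cons, List.countP_cons, hg]
          simp only [Option.isNone_some, if_false, add_zero, Bool.false_eq_true,
            List.append_assoc, List.singleton_append]
      | none =>
          have hg : gIdx old n = none := by unfold gIdx; rw [h]
          rw [ih, List.filterMap_cons, List.countP_cons, hg]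
          simp only [Option.isNone_none, if_true, List.append_assoc, List.singleton_append]
          push_cast
          have h2 : mi + 1 + ((List.countP (fun n => (gIdx old n).isNone) ns : Nat) : Int)
              = mi + (((List.countP (fun n => (gIdx old n).isNone) ns : Nat) : Int) + 1) := by ring
          rw [h2]
          rw [PySem.List.pyRange_one_cons (a := mi)
            (b := mi + (((List.countP (fun n => (gIdx old n).isNone) ns : Nat) : Int) + 1))
            (by omega)]

theorem length_filterMap_add_countP (old : List Int) (new : List Int) :
    ((new.filterMap (fun n => gIdx old n)).length : Int)
      + (new.countP (fun n => (gIdx old n).isNone)) = new.length := by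
  induction new with
  | nil => rfl
  | cons n ns ih =>
      rw [List.filterMap_cons, List.countP_cons]
      cases gIdx old n <;> simp only [Option.isNone_none, Option.isNone_some,
        if_true, if_false, List.length_cons, Bool.false_eq_true, add_zero] <;> push_cast <;> omega

theorem reorder_index_eq_alt (old new : List Int) (b : Bool) :
    reorder_index old new b = reorder_index_alt old new b := by
  have hfound : (PySem.List.pyRange 0 (new.length : Int) 1).filterMap
      (fun j => ((PySem.List.enumerate old 0).foldl scatterStep
        (slotsOf new, PySem.Dict.empty)).2.get? j)
      = new.filterMap (fun n => gIdx old n) := by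
    rw [PySem.List.pyRange_one]
    simp only [sub_zero, Int.toNat_natCast]
    rw [List.filterMap_map]
    have hcongr : ∀ k ∈ List.range new.length,
        ((fun j => ((PySem.List.enumerate old 0).foldl scatterStep
          (slotsOf new, PySem.Dict.empty)).2.get? j) ∘ (fun k : Nat => (0 : Int) + k)) k
        = new[k]?.bind (fun n => gIdx old n) := by
      intro k _
      simp only [Function.comp, zero_add]
      exact out_get old new k
    rw [List.filterMap_congr hcongr, filterMap_range_getElem]
  have hlen := length_filterMap_add_countP old new
  have hend : (old.length : Int) + ((new.length : Int)
      - ((new.filterMap (fun n => gIdx old n)).length : Int))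
      = (old.length : Int) + ((new.countP (fun n => (gIdx old n).isNone) : Int)) := by
    omega
  simp only [reorder_index, reorder_index_alt]
  rw [loopA_spec, hfound, hend]
  simp only [List.nil_append]

-- ===== VERDICT (by name: the statement is the Claim_ definition above) =====
theorem reorder_index_spec : Claim_equal_reorder_index := by
  intro old new b _
  unfold Spec_reorder_index
  exact reorder_index_eq_alt old new b
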